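-- pv_equiv track=rewrite | github.com/cdpcre/fantasanremo-team-build-app | backend/ml/biographical_features.py | get_generational_cohort
-- ===== SOURCE A (Python) =====
-- GENERATIONAL_COHORTS = {
--     "gen_z": {"range": (1997, 2012), "age_2026": (14, 29), "description": "Gen Z (14-29)"},
--     "millennial": {
--         "range": (1981, 1996),
--         "age_2026": (30, 45),
--         "description": "Millennial (30-45)",
--     },
--     "gen_x": {"range": (1965, 1980), "age_2026": (46, 61), "description": "Gen X (46-61)"},
--     "boomer": {"range": (1946, 1964), "age_2026": (62, 80), "description": "Boomer (62-80)"},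
-- }
--
-- def get_generational_cohort(anno_nascita: int | None) -> str:
--     """
--     Determina la generazione di appartenenza.
--
--     Args:
--         anno_nascita: Anno di nascita
--
--     Returns:
--         Generazione (gen_z, millennial, gen_x, boomer, unknown)
--     """
--     if not anno_nascita:
--         return "millennial"  # Default assumption
--
--     for cohort, info in GENERATIONAL_COHORTS.items():
--         min_year, max_year = info["range"]
--         if min_year <= anno_nascita <= max_year:
--             return cohort
--
--     # Before boomers
--     if anno_nascita < 1946:
--         return "boomer"
--
--     # After Gen Z (too young for Sanremo)
--     if anno_nascita > 2012:
--         return "gen_z"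
--
--     return "millennial"  # Default
-- ===== SOURCE B (Python) =====
-- def get_generational_cohort(anno_nascita: int | None) -> str:
--     """Threshold chain over the contiguous cohort boundaries; no table scan."""
--     if not anno_nascita:
--         return "millennial"
--     if anno_nascita <= 1964:
--         return "boomer"
--     if anno_nascita <= 1980:
--         return "gen_x"
--     if anno_nascita <= 1996:
--         return "millennial"
--     return "gen_z"
-- ===== Notes on version B (the rewrite author's own statement) =====
-- stated objective: simpler
-- what changed: Replaced the GENERATIONAL_COHORTS dict scan plus separate before/after fallbacks with a single chain of four threshold comparisons exploiting the ranges' contiguity.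
import Mathlib
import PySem

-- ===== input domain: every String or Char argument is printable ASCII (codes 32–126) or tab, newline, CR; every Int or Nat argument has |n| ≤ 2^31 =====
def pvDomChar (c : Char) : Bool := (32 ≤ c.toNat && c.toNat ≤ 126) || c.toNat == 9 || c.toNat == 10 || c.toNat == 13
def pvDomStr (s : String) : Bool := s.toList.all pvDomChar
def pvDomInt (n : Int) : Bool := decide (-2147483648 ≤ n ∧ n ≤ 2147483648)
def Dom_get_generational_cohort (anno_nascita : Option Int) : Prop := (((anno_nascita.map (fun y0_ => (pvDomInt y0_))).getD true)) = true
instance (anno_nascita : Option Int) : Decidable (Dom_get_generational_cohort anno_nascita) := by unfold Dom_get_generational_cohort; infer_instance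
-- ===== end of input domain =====

-- B drops A's dict scan and fallbacks in favour of a chain of threshold comparisons (simpler).

-- ===== PORT A =====
-- the GENERATIONAL_COHORTS table: (cohort name, (min_year, max_year)), in insertion order
def GENERATIONAL_COHORTS : List (String × (Int × Int)) :=
  [("gen_z", (1997, 2012)), ("millennial", (1981, 1996)),
   ("gen_x", (1965, 1980)), ("boomer", (1946, 1964))]

-- the for-loop over GENERATIONAL_COHORTS.items(): first range containing the year wins
def cohortScan (anno : Int) : List (String × (Int × Int)) → Option String
  | [] => none
  | (cohort, (mn, mx)) :: rest =>
      if mn ≤ anno ∧ anno ≤ mx then some cohort else cohortScan anno rest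

def get_generational_cohort (anno_nascita : Option Int) : String :=
  -- 'if not anno_nascita': None or 0 is falsy
  match anno_nascita with
  | none => "millennial"
  | some anno =>
      if anno = 0 then "millennial"
      else
        match cohortScan anno GENERATIONAL_COHORTS with
        | some c => c
        | none =>
            if anno < 1946 then "boomer"
            else if anno > 2012 then "gen_z"
            else "millennial"

-- ===== PORT B =====
def get_generational_cohort_alt (anno_nascita : Option Int) : String :=
  match anno_nascita with
  | none => "millennial"
  | some anno =>
      if anno = 0 then "millennial"
      else if anno ≤ 1964 then "boomer"
      else if anno ≤ 1980 then "gen_x"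
      else if anno ≤ 1996 then "millennial"
      else "gen_z"

-- ===== PRECONDITION & SPEC =====
def Spec_get_generational_cohort (anno_nascita : Option Int) (out : String) : Prop := out = get_generational_cohort_alt anno_nascita
instance (anno_nascita : Option Int) (out : String) : Decidable (Spec_get_generational_cohort anno_nascita out) := by unfold Spec_get_generational_cohort; infer_instance

-- ===== CLAIM (what is proved, stated in full; the proofs are below) =====
def Claim_equal_get_generational_cohort : Prop := ∀ (anno_nascita : Option Int), Dom_get_generational_cohort anno_nascita → Spec_get_generational_cohort anno_nascita (get_generational_cohort anno_nascita)

-- ===== LEMMAS AND PROOFS =====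

-- ===== VERDICT (by name: the statement is the Claim_ definition above) =====
theorem get_generational_cohort_spec : Claim_equal_get_generational_cohort := by
  intro anno_nascita _dom
  unfold Spec_get_generational_cohort
  match anno_nascita with
  | none => rfl
  | some anno =>
      simp only [get_generational_cohort, get_generational_cohort_alt,
        GENERATIONAL_COHORTS, cohortScan]
      split_ifs <;> first | rfl | omega
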